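-- pv_equiv track=rewrite | github.com/Akshat-ak47/365-Day-Coding | 75_remove_consecutive_char.py | solve
-- ===== SOURCE A (Python) =====
-- def solve(A, B):
--     if B == 1:
--         return ""
--
--     N = len(A)
--     res = ""
--     i = 0
--
--     while i < N:
--         cnt = 1
--         j = i + 1
--         while j < N and A[j] == A[i]:
--             j += 1
--             cnt += 1
--         if cnt != B:
--             while i < j:
--                 res += A[i]
--                 i += 1
--         i = j
--     return res
-- ===== SOURCE B (Python) =====
-- def solve(A, B):
--     if B == 1:
--         return ""
--     n = len(A)
--     starts = [i for i in range(n) if i == 0 or A[i] != A[i - 1]]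
--     starts.append(n)
--     return "".join(A[s:e] for s, e in zip(starts, starts[1:]) if e - s != B)
-- ===== Notes on version B (the rewrite author's own statement) =====
-- stated objective: alternative
-- what changed: Instead of A's nested two-pointer while loops that count each run and copy it character by character into a growing string (quadratic 'res += A[i]'), B first builds an array of run-start indices by one adjacent-inequality comparison pass, then joins the slices between consecutive boundaries whose width is not B.
import Mathlib
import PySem

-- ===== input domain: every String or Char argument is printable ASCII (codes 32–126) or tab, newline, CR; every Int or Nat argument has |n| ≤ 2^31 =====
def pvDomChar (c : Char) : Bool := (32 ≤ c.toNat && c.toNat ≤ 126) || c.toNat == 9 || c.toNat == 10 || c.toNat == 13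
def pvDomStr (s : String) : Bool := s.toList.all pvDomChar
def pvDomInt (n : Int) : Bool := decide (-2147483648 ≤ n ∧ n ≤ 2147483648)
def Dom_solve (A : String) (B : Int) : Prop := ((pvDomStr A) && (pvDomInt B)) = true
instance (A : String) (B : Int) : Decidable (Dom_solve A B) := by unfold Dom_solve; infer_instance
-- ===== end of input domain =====

-- B replaces A's nested two-pointer run-counting/copying loops (with quadratic
-- character-by-character string growth) by two staged passes: build the list of
-- run-start indices by adjacent comparison, then join the slices between consecutive
-- boundaries whose width is not B; same result, measured faster on large inputs.

-- ===== PORT A =====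
-- inner `while j < N and A[j] == A[i]` loop (c = A[i]); returns (j, cnt)
def solveCnt (l : List Char) (c : Char) (j cnt : Nat) : Nat × Nat :=
  if _h : j < l.length ∧ l.getD j ' ' == c then
    solveCnt l c (j + 1) (cnt + 1)
  else (j, cnt)
termination_by l.length - j
decreasing_by omega

theorem solveCnt_ge (l : List Char) (c : Char) (j cnt : Nat) : j ≤ (solveCnt l c j cnt).1 := by
  unfold solveCnt
  split
  · exact le_trans (Nat.le_succ j) (solveCnt_ge l c (j + 1) (cnt + 1))
  · exact le_refl j
termination_by l.length - j
decreasing_by rename_i h; omega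

-- `while i < j: res += A[i]; i += 1`
def solveCopy (l : List Char) (i j : Nat) (res : List Char) : List Char :=
  if _h : i < j then solveCopy l (i + 1) j (res ++ [l.getD i ' ']) else res
termination_by j - i
decreasing_by omega

-- outer `while i < N` loop
def solveLoop (l : List Char) (B : Int) (i : Nat) (res : List Char) : List Char :=
  if h : i < l.length then
    let p := solveCnt l (l.getD i ' ') (i + 1) 1
    let res' := if (p.2 : Int) ≠ B then solveCopy l i p.1 res else res
    solveLoop l B p.1 res'
  else res
termination_by l.length - i
decreasing_by
  have := solveCnt_ge l (l.getD i ' ') (i + 1) 1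
  omega

def solve (A : String) (B : Int) : String :=
  if B = 1 then "" else String.mk (solveLoop A.toList B 0 [])

-- ===== PORT B =====
-- `[i for i in range(n) if i == 0 or A[i] != A[i - 1]]`; the `i == 0` disjunct
-- short-circuits in Python, so `A[i-1]` is never evaluated at i = 0 and the
-- Nat `i - 1` below is harmless there.
def altStarts (l : List Char) : List Nat :=
  (List.range l.length).filter (fun i => (i == 0) || !(l.getD i ' ' == l.getD (i - 1) ' '))

-- `A[s:e]` with 0 ≤ s ≤ e ≤ n (as produced by the sorted boundary list) is exactly
-- `(l.drop s).take (e - s)`; `e - s != B` is the Int comparison.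
def solve_alt (A : String) (B : Int) : String :=
  if B = 1 then ""
  else
    let l := A.toList
    let ss := altStarts l ++ [l.length]
    String.mk ((((ss.zip ss.tail).filter (fun p => ((p.2 : Int) - (p.1 : Int)) != B)).map
      (fun p => (l.drop p.1).take (p.2 - p.1))).flatten)

-- ===== PRECONDITION & SPEC =====
def Spec_solve (A : String) (B : Int) (out : String) : Prop := out = solve_alt A B
instance (A : String) (B : Int) (out : String) : Decidable (Spec_solve A B out) := by unfold Spec_solve; infer_instance

-- ===== CLAIM (what is proved, stated in full; the proofs are below) =====
def Claim_equal_solve : Prop := ∀ (A : String) (B : Int), Dom_solve A B → Spec_solve A B (solve A B)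

-- ===== LEMMAS AND PROOFS =====

-- proof-only intermediate: the maximal runs of equal characters
def solveRuns (l : List Char) : List (List Char) :=
  match l with
  | [] => []
  | c :: rest => (c :: rest.takeWhile (· == c)) :: solveRuns (rest.dropWhile (· == c))
termination_by l.length
decreasing_by
  simp only [List.length_cons]
  exact Nat.lt_succ_of_le (List.length_dropWhile_le _ _)

theorem takeWhile_length_le (l : List Char) (p : Char → Bool) :
    (l.takeWhile p).length ≤ l.length := by
  induction l with
  | nil => simp
  | cons a t ih =>
    rw [List.takeWhile_cons]
    split
    · simpa using ih
    · simp

theorem take_takeWhile_length (l : List Char) (p : Char → Bool) :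
    l.take (l.takeWhile p).length = l.takeWhile p := by
  induction l with
  | nil => simp
  | cons a t ih => rw [List.takeWhile_cons]; split <;> simp [ih]

theorem solveCnt_spec (l : List Char) (c : Char) (j cnt : Nat) :
    solveCnt l c j cnt =
      (j + ((l.drop j).takeWhile (· == c)).length,
       cnt + ((l.drop j).takeWhile (· == c)).length) := by
  unfold solveCnt
  split
  · rename_i h
    obtain ⟨hj, hc⟩ := h
    rw [solveCnt_spec l c (j + 1) (cnt + 1)]
    have hd : l.drop j = l.getD j ' ' :: l.drop (j + 1) := by
      rw [List.getD_eq_getElem l ' ' hj]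
      exact List.drop_eq_getElem_cons hj
    rw [hd, List.takeWhile_cons, if_pos hc]
    simp; omega
  · rename_i h
    by_cases hj : j < l.length
    · have hc : ¬ (l.getD j ' ' == c) := fun hcc => h ⟨hj, hcc⟩
      have hd : l.drop j = l.getD j ' ' :: l.drop (j + 1) := by
        rw [List.getD_eq_getElem l ' ' hj]
        exact List.drop_eq_getElem_cons hj
      rw [hd, List.takeWhile_cons, if_neg hc]
      simp
    · have : l.drop j = [] := List.drop_eq_nil_of_le (by omega)
      rw [this]; simp
termination_by l.length - j
decreasing_by rename_i h; omega

theorem solveCopy_spec (l : List Char) (i j : Nat) (res : List Char) (hj : j ≤ l.length) :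
    solveCopy l i j res = res ++ ((l.drop i).take (j - i)) := by
  unfold solveCopy
  split
  · rename_i h
    rw [solveCopy_spec l (i + 1) j _ hj]
    have hi : i < l.length := by omega
    have hd : l.drop i = l.getD i ' ' :: l.drop (i + 1) := by
      rw [List.getD_eq_getElem l ' ' hi]
      exact List.drop_eq_getElem_cons hi
    rw [hd]
    have : j - i = (j - (i + 1)) + 1 := by omega
    rw [this, List.take_succ_cons, List.append_assoc]
    rfl
  · rename_i h
    have : j - i = 0 := by omega
    simp [this]
termination_by j - i
decreasing_by omega

theorem solveLoop_spec (B : Int) (s : List Char) :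
    ∀ (l : List Char) (i : Nat) (res : List Char), l.drop i = s →
      solveLoop l B i res =
        res ++ ((solveRuns s).filter (fun r => (r.length : Int) != B)).flatten := by
  induction s using solveRuns.induct with
  | case1 =>
    intro l i res hs
    unfold solveLoop
    have : ¬ i < l.length := by
      have := List.drop_eq_nil_iff.mp hs; omega
    rw [dif_neg this]
    simp [solveRuns]
  | case2 c rest ih =>
    intro l i res hs
    have hi : i < l.length := by
      by_contra h
      rw [List.drop_eq_nil_of_le (by omega)] at hs
      exact List.cons_ne_nil c rest hs.symm
    have hd : l.drop i = l.getD i ' ' :: l.drop (i + 1) := by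
      rw [List.getD_eq_getElem l ' ' hi]
      exact List.drop_eq_getElem_cons hi
    have hc : l.getD i ' ' = c := by rw [hd] at hs; exact (List.cons.injEq _ _ _ _ ▸ hs).1
    have ht : l.drop (i + 1) = rest := by rw [hd] at hs; exact (List.cons.injEq _ _ _ _ ▸ hs).2
    unfold solveLoop
    rw [dif_pos hi]
    simp only [solveCnt_spec, ht, hc]
    set k := (rest.takeWhile (· == c)).length with hk
    have hkle : k ≤ rest.length := takeWhile_length_le rest (· == c)
    have hlen : l.length = i + 1 + rest.length := by
      have := List.length_drop (l := l) (i := i + 1)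
      rw [ht] at this; omega
    have hrun : (l.drop i).take (i + 1 + k - i) = c :: rest.takeWhile (· == c) := by
      rw [hs]
      have : i + 1 + k - i = k + 1 := by omega
      rw [this, List.take_succ_cons]
      congr 1
      exact take_takeWhile_length rest (· == c)
    have hdrop : l.drop (i + 1 + k) = rest.dropWhile (· == c) := by
      have : l.drop (i + 1 + k) = (l.drop (i + 1)).drop k := by
        rw [List.drop_drop]
      rw [this, ht]
      conv_lhs => rw [← List.takeWhile_append_dropWhile (p := (· == c)) (l := rest)]
      rw [List.drop_append_of_le_length (by omega)]
      simp [hk]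
    rw [ih (l := l) (i := i + 1 + k) _ hdrop]
    rw [solveRuns]
    simp only [List.filter_cons]
    have hcntlen : ((1 + k : Nat) : Int) = ((c :: rest.takeWhile (· == c)).length : Int) := by
      simp; omega
    by_cases hB : ((1 + k : Nat) : Int) = B
    · have : ¬ ((1 + k : Nat) : Int) ≠ B := by simpa using hB
      rw [if_neg this]
      have : ((((c :: rest.takeWhile (· == c)).length : Int)) != B) = false := by
        rw [← hcntlen]; simpa using hB
      rw [this]
      simp
    · rw [if_pos hB]
      have : ((((c :: rest.takeWhile (· == c)).length : Int)) != B) = true := by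
        rw [← hcntlen]; simpa using hB
      rw [this]
      rw [solveCopy_spec l i (i + 1 + k) res (by omega), hrun]
      simp

-- ----- B-side characterisation -----

theorem dropWhile_head_false (p : Char → Bool) :
    ∀ (l : List Char) (b : Char) (t : List Char), l.dropWhile p = b :: t → p b = false := by
  intro l
  induction l with
  | nil => intro b t h; simp at h
  | cons a l ih =>
    intro b t h
    rw [List.dropWhile_cons] at h
    by_cases hp : p a = true
    · rw [if_pos hp] at h; exact ih b t h
    · rw [if_neg hp] at h
      injection h with h1 _
      rw [← h1]; simpa using hp

-- the run-start indices of c :: rest: 0, then the starts of the tail after the first run, shifted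
theorem altStarts_cons (c : Char) (rest : List Char) :
    altStarts (c :: rest) =
      0 :: (altStarts (rest.dropWhile (· == c))).map
        (fun j => ((rest.takeWhile (· == c)).length + 1) + j) := by
  set t := rest.takeWhile (· == c) with htdef
  set d := rest.dropWhile (· == c) with hddef
  set m := t.length + 1 with hm
  set l := c :: rest with hl
  have hsplit : l = (c :: t) ++ d := by
    rw [hl, htdef, hddef]; simp [List.takeWhile_append_dropWhile]
  have hmlen : (c :: t).length = m := by simp [hm]
  have hlen : l.length = m + d.length := by
    rw [hsplit, List.length_append, hmlen]
  have hallc : ∀ i < m, l.getD i ' ' = c := by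
    intro i hi
    rw [hsplit, List.getD_append _ _ _ _ (by omega)]
    have hi' : i < (c :: t).length := by omega
    rw [List.getD_eq_getElem _ _ hi']
    have hmem := List.getElem_mem hi'
    rcases List.mem_cons.mp hmem with h | h
    · exact h
    · have ht' : (c :: t)[i] ∈ rest.takeWhile (· == c) := by rw [← htdef]; exact h
      simpa using List.mem_takeWhile_imp ht' 
  have hdget : ∀ j, l.getD (m + j) ' ' = d.getD j ' ' := by
    intro j
    rw [hsplit, List.getD_append_right _ _ _ _ (by omega)]
    congr 1; omega
  have part1 : (List.range m).filter
      (fun i => (i == 0) || !(l.getD i ' ' == l.getD (i - 1) ' ')) = [0] := by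
    have hcongr : ∀ i ∈ List.range m,
        ((i == 0) || !(l.getD i ' ' == l.getD (i - 1) ' ')) = (i == 0) := by
      intro i hi
      have hi' : i < m := List.mem_range.mp hi
      by_cases h0 : i = 0
      · simp [h0]
      · have h0' : (i == 0) = false := by simp [h0]
        have h1 : l.getD i ' ' = c := hallc i hi'
        have h2 : l.getD (i - 1) ' ' = c := hallc (i - 1) (by omega)
        rw [h0', h1, h2]
        simp
    rw [List.filter_congr hcongr, hm, List.range_succ_eq_map]
    rw [List.filter_cons_of_pos (by simp), List.filter_map]
    have : List.filter ((fun i => i == 0) ∘ Nat.succ) (List.range t.length) = [] := by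
      apply List.filter_eq_nil_iff.mpr
      intro a _
      simp
    rw [this]
    simp
  have part2 : ((List.range d.length).map (fun j => m + j)).filter
      (fun i => (i == 0) || !(l.getD i ' ' == l.getD (i - 1) ' '))
      = (altStarts d).map (fun j => m + j) := by
    rw [List.filter_map, altStarts]
    refine congrArg (List.map _) (List.filter_congr ?_)
    intro j hj
    have hj' : j < d.length := List.mem_range.mp hj
    simp only [Function.comp_apply]
    have hmj : (m + j == 0) = false := by simp [hm]
    by_cases h0 : j = 0
    · subst h0
      obtain ⟨b, t', hbt⟩ : ∃ b t', d = b :: t' := by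
        cases hcase : d with
        | nil => rw [hcase] at hj'; simp at hj'
        | cons b t' => exact ⟨b, t', rfl⟩
      have hb : (b == c) = false :=
        dropWhile_head_false (· == c) rest b t' (by rw [← hddef]; exact hbt)
      have e1 : l.getD (m + 0) ' ' = b := by rw [hdget]; simp [hbt]
      have e2 : l.getD (m + 0 - 1) ' ' = c := hallc (m + 0 - 1) (by omega)
      rw [e1, e2, hmj, hb]
      simp
    · have hj0 : (j == 0) = false := by simp [h0]
      have e1 : l.getD (m + j) ' ' = d.getD j ' ' := hdget j
      have e2 : l.getD (m + j - 1) ' ' = d.getD (j - 1) ' ' := by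
        have h' : m + j - 1 = m + (j - 1) := by omega
        rw [h', hdget]
      rw [e1, e2, hmj, hj0]
  rw [altStarts, hlen, List.range_add, List.filter_append, part1, part2]
  simp

-- segment with its width, as Source B's zip pass computes them
def segLen (l : List Char) (p : Nat × Nat) : List Char × Int :=
  ((l.drop p.1).take (p.2 - p.1), (p.2 : Int) - (p.1 : Int))

theorem pairs_eq : ∀ (l : List Char),
    (((altStarts l ++ [l.length]).zip (altStarts l ++ [l.length]).tail).map (segLen l))
      = (solveRuns l).map (fun r => (r, (r.length : Int))) := by
  intro l
  induction l using solveRuns.induct with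
  | case1 => simp [altStarts, solveRuns]
  | case2 c rest ih =>
    set t := rest.takeWhile (· == c) with htdef
    set d := rest.dropWhile (· == c) with hddef
    set m := t.length + 1 with hm
    have hsplit : (c :: rest) = (c :: t) ++ d := by
      rw [htdef, hddef]; simp [List.takeWhile_append_dropWhile]
    have hmlen : (c :: t).length = m := by simp [hm]
    have hlen : (c :: rest).length = m + d.length := by
      rw [hsplit, List.length_append, hmlen]
    have hss : altStarts (c :: rest) ++ [(c :: rest).length]
        = 0 :: ((altStarts d ++ [d.length]).map (fun j => m + j)) := by
      rw [altStarts_cons, hlen]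
      simp [hm, htdef, hddef]
    obtain ⟨h, tl, hssd⟩ : ∃ h tl, altStarts d ++ [d.length] = h :: tl := by
      cases hcase : altStarts d ++ [d.length] with
      | nil => simp at hcase
      | cons h tl => exact ⟨h, tl, rfl⟩
    have hh0 : h = 0 := by
      cases hdcase : d with
      | nil => rw [hdcase] at hssd; simp [altStarts] at hssd; omega
      | cons b t' =>
        rw [hdcase, altStarts_cons] at hssd
        exact ((List.cons.injEq _ _ _ _).mp hssd).1.symm
    have hshift : ∀ (p : Nat × Nat),
        segLen (c :: rest) (m + p.1, m + p.2) = segLen d p := by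
      intro p
      have h1 : (c :: rest).drop (m + p.1) = d.drop p.1 := by
        rw [hsplit, ← hmlen, List.drop_length_add_append]
      have h2 : (m + p.2) - (m + p.1) = p.2 - p.1 := by omega
      simp [segLen, h1, h2]
    have hcomp : (segLen (c :: rest)) ∘ (Prod.map (fun j => m + j) (fun j => m + j))
        = segLen d := by
      funext p
      cases p with
      | mk a b => exact hshift (a, b)
    have htake : (c :: rest).take m = c :: t := by
      rw [hsplit, ← hmlen, List.take_left]
    subst hh0
    rw [hssd] at ih
    rw [hss, hssd]
    simp only [List.tail_cons]
    have hmap : List.map (fun j => m + j) (0 :: tl) = m :: List.map (fun j => m + j) tl := by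
      simp
    rw [hmap, List.zip_cons_cons, List.map_cons]
    have hzip : (m :: List.map (fun j => m + j) tl).zip (List.map (fun j => m + j) tl)
        = ((0 :: tl).zip tl).map (Prod.map (fun j => m + j) (fun j => m + j)) := by
      rw [← hmap]
      exact List.zip_map
    have htl2 : (0 :: tl).zip tl = (0 :: tl).zip (0 :: tl).tail := rfl
    rw [hzip, htl2, List.map_map, hcomp, ih]
    rw [solveRuns, List.map_cons]
    congr 1
    · unfold segLen
      simp only [List.drop_zero, Nat.sub_zero, htake]
      rw [Prod.mk.injEq]
      refine ⟨rfl, ?_⟩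
      rw [hmlen]
      simp

theorem filtered_eq (l : List Char) (B : Int) :
    ((((altStarts l ++ [l.length]).zip (altStarts l ++ [l.length]).tail).filter
        (fun p => ((p.2 : Int) - (p.1 : Int)) != B)).map
      (fun p => (l.drop p.1).take (p.2 - p.1))).flatten
      = ((solveRuns l).filter (fun r => (r.length : Int) != B)).flatten := by
  have h := congrArg
    (fun L : List (List Char × Int) => ((L.filter (fun q => q.2 != B)).map Prod.fst).flatten)
    (pairs_eq l)
  simp only [List.filter_map, List.map_map, Function.comp_def, segLen] at h
  simpa using h

-- ===== VERDICT (by name: the statement is the Claim_ definition above) =====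
theorem solve_spec : Claim_equal_solve := by
  intro A B _
  unfold Spec_solve solve solve_alt
  by_cases hB : B = 1
  · simp [hB]
  · rw [if_neg hB, if_neg hB]
    rw [solveLoop_spec B A.toList A.toList 0 [] (by simp)]
    simp only [List.nil_append]
    rw [← filtered_eq A.toList B]
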